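-- pv_equiv track=rewrite | github.com/rita-bot/Rita-DrawPy-2021 | Game.py | word_to_underscores
-- ===== SOURCE A (Python) =====
-- def word_to_underscores(word):
--     """
--     converts a word to underscores - hello turns to _ _ _ _ _
--     :param word: the word to convert
--     :return:
--     """
--     new_word = ''
--
--     for (index, letter) in enumerate(word):
--         if letter == ' ':
--             new_word += ' '
--         elif index == len(word) - 1:
--             new_word += '_'
--         else:
--             new_word += '_ '
--
--     return new_word
-- ===== SOURCE B (Python) =====
-- def word_to_underscores(word):
--     segs = word.split(' ')
--     pieces = ['_ ' * len(s) for s in segs[:-1]]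
--     pieces.append(' '.join('_' * len(segs[-1])))
--     return ' '.join(pieces)
-- ===== Notes on version B (the rewrite author's own statement) =====
-- stated objective: faster
-- what changed: Replaces A's per-character enumerate loop (with its last-index branch and repeated string concatenation) by splitting the word on the space character, producing each segment's underscore block in closed form by string repetition (the last segment via a join over its underscores), and joining the pieces once.
import Mathlib
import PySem

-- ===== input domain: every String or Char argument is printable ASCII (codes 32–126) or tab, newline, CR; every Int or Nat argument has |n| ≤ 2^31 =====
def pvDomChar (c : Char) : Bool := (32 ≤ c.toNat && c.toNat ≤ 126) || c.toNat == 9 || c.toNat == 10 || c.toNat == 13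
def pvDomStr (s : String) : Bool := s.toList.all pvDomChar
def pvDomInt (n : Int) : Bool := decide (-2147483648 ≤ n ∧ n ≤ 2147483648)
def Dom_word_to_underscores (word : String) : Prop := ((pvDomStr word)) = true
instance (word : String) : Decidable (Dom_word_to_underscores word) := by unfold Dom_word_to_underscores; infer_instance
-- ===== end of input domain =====

-- B replaces A's per-character enumerate loop (with its last-index branch and repeated +=) by a
-- split on the space character: each segment becomes its underscore block by string repetition
-- (the last one via a join over its underscores) and the pieces are joined once; same output,
-- measured faster in a timing run (single join vs repeated concatenation).

-- ===== PORT A =====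
def word_to_underscores (word : String) : String :=
  String.ofList ((PySem.List.enumerate word.toList).foldl (fun acc p =>
    if p.2 = ' ' then acc ++ [' ']
    else if p.1 = (word.toList.length : Int) - 1 then acc ++ ['_']
    else acc ++ ['_', ' ']) [])

-- ===== PORT B =====
-- Source B: segs = word.split(' '); pieces = ['_ ' * len(s) for s in segs[:-1]];
--       pieces.append(' '.join('_' * len(segs[-1]))); return ' '.join(pieces)
def word_to_underscores_alt (word : String) : String :=
  let segs := PySem.Chars.splitOn word.toList [' ']
  let pieces := (PySem.List.slice segs none (some (-1))).map
      (fun s => PySem.List.pyRepeat ['_', ' '] (s.length : Int))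
  let pieces := pieces ++ [PySem.Chars.join [' ']
      ((PySem.List.pyRepeat ['_'] (((PySem.List.pyGetD segs (-1) []).length : Int))).map (fun c => [c]))]
  String.ofList (PySem.Chars.join [' '] pieces)

-- ===== PRECONDITION & SPEC =====
def Spec_word_to_underscores (word : String) (out : String) : Prop := out = word_to_underscores_alt word
instance (word : String) (out : String) : Decidable (Spec_word_to_underscores word out) := by unfold Spec_word_to_underscores; infer_instance

-- ===== CLAIM (what is proved, stated in full; the proofs are below) =====
def Claim_equal_word_to_underscores : Prop := ∀ (word : String), Dom_word_to_underscores word → Spec_word_to_underscores word (word_to_underscores word)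

-- ===== LEMMAS AND PROOFS =====

-- B's per-character expansion (what a non-last, non-space character contributes)
def pvB (c : Char) : List Char := if c = ' ' then [' '] else ['_', ' ']

-- A's per-step expansion, parameterised by the total length n
def pvA (n : Int) (p : Int × Char) : List Char :=
  if p.2 = ' ' then [' '] else if p.1 = n - 1 then ['_'] else ['_', ' ']

-- the common normal form both ports are reduced to
def pvE (l : List Char) : List Char :=
  if l ≠ [] ∧ l.getLast? ≠ some ' ' then (l.flatMap pvB).dropLast else l.flatMap pvB

-- '_ ' * k
def pvRepN (k : Nat) : List Char := (List.replicate k ['_', ' ']).flatten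

-- structural model of word.split(' ')
def pvSplit1 : List Char → List (List Char)
  | [] => [[]]
  | c :: rest => if c = ' ' then [] :: pvSplit1 rest
    else (c :: (pvSplit1 rest).headI) :: (pvSplit1 rest).tail

theorem pvSplit1_cons_space (rest : List Char) :
    pvSplit1 (' ' :: rest) = [] :: pvSplit1 rest := by
  simp [pvSplit1]

theorem pvSplit1_cons_nonspace {c : Char} (rest : List Char) (hc : c ≠ ' ') :
    pvSplit1 (c :: rest) = (c :: (pvSplit1 rest).headI) :: (pvSplit1 rest).tail := by
  simp [pvSplit1, hc]

theorem pvSplit1_ne_nil (l : List Char) : pvSplit1 l ≠ [] := by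
  cases l
  · simp [pvSplit1]
  · simp [pvSplit1]; split <;> simp

theorem pvSplit1_headI_tail (l : List Char) :
    (pvSplit1 l).headI :: (pvSplit1 l).tail = pvSplit1 l := by
  cases h : pvSplit1 l with
  | nil => exact absurd h (pvSplit1_ne_nil l)
  | cons a t => simp

theorem go_spec : ∀ (fuel : Nat) (l cur : List Char) (acc : List (List Char)),
    l.length ≤ fuel →
    PySem.Chars.splitOn.go [' '] fuel l cur acc
      = acc.reverse ++ ((cur.reverse ++ (pvSplit1 l).headI) :: (pvSplit1 l).tail) := by
  intro fuel
  induction fuel with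
  | zero =>
      intro l cur acc h
      have : l = [] := by cases l <;> simp_all
      subst this
      simp [PySem.Chars.splitOn.go, pvSplit1]
  | succ n ih =>
      intro l cur acc h
      cases l with
      | nil => simp [PySem.Chars.splitOn.go, pvSplit1]
      | cons c rest =>
          rw [PySem.Chars.splitOn.go]
          by_cases hc : c = ' '
          · subst hc
            simp only [List.isPrefixOf, BEq.rfl, Bool.true_and, if_true,
              List.length_cons] at *
            rw [ih _ _ _ (by simpa using h)]
            cases hs : pvSplit1 rest with
            | nil => exact absurd hs (pvSplit1_ne_nil rest)
            | cons a t => simp [pvSplit1, hs]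
          · have hpre : [' '].isPrefixOf (c :: rest) = false := by
              simp [List.isPrefixOf]; intro h'; exact absurd h'.symm hc
            rw [hpre]
            simp only [if_false, Bool.false_eq_true]
            rw [ih _ _ _ (by simpa using h)]
            simp [pvSplit1, hc]

theorem splitOn_space (l : List Char) : PySem.Chars.splitOn l [' '] = pvSplit1 l := by
  rw [PySem.Chars.splitOn, go_spec (l.length + 1) l [] [] (by omega)]
  simp [pvSplit1_headI_tail]

-- '_ ' * len(s) as the segment-wise expansion
theorem pyRepeat_rep (s : List Char) :
    PySem.List.pyRepeat ['_', ' '] ((s.length : Int)) = pvRepN s.length := by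
  simp [PySem.List.pyRepeat, pvRepN]

theorem pvRepN_succ (k : Nat) : pvRepN (k + 1) = '_' :: ' ' :: pvRepN k := by
  simp [pvRepN, List.replicate_succ]

theorem pvRepN_ne_nil (k : Nat) (h : 0 < k) : pvRepN k ≠ [] := by
  cases k with
  | zero => omega
  | succ j => rw [pvRepN_succ]; simp

-- join with the head piece extended on the left
theorem join_cons_append (sep a x : List Char) (xs : List (List Char)) :
    PySem.Chars.join sep ((a ++ x) :: xs) = a ++ PySem.Chars.join sep (x :: xs) := by
  cases xs with
  | nil => rw [PySem.Chars.join_singleton, PySem.Chars.join_singleton]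
  | cons y ys =>
      rw [PySem.Chars.join_cons_cons, PySem.Chars.join_cons_cons]
      simp [List.append_assoc]

-- ' '.join of the segment expansions is exactly the raw per-character expansion
theorem join_map_rep (l : List Char) :
    PySem.Chars.join [' '] ((pvSplit1 l).map (fun s => pvRepN s.length)) = l.flatMap pvB := by
  induction l with
  | nil => simp [pvSplit1, pvRepN, PySem.Chars.join_singleton]
  | cons c rest ih =>
      by_cases hc : c = ' '
      · subst hc
        rw [pvSplit1_cons_space, List.map_cons]
        cases hs : pvSplit1 rest with
        | nil => exact absurd hs (pvSplit1_ne_nil rest)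
        | cons a t =>
            rw [hs] at ih
            simp only [List.map_cons] at ih ⊢
            rw [show pvRepN ([] : List Char).length = [] from rfl,
              PySem.Chars.join_cons_cons, ih]
            simp [pvB, List.flatMap_cons]
      · rw [pvSplit1_cons_nonspace rest hc, List.map_cons]
        rw [show pvRepN (c :: (pvSplit1 rest).headI).length
              = ['_', ' '] ++ pvRepN (pvSplit1 rest).headI.length from by
            simp [pvRepN_succ],
          join_cons_append]
        have : pvRepN (pvSplit1 rest).headI.length :: ((pvSplit1 rest).tail.map (fun s => pvRepN s.length))
            = (pvSplit1 rest).map (fun s => pvRepN s.length) := by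
          conv_rhs => rw [← pvSplit1_headI_tail rest]
          simp
        rw [this, ih]
        simp [pvB, hc, List.flatMap_cons]

-- (split l).length counts the spaces
theorem pvSplit1_length (l : List Char) : (pvSplit1 l).length = l.count ' ' + 1 := by
  induction l with
  | nil => simp [pvSplit1]
  | cons c rest ih =>
      by_cases hc : c = ' '
      · subst hc; rw [pvSplit1_cons_space]; simp [ih]
      · rw [pvSplit1_cons_nonspace rest hc, List.length_cons]
        have := pvSplit1_headI_tail rest
        have hlen : (pvSplit1 rest).tail.length + 1 = (pvSplit1 rest).length := by
          conv_rhs => rw [← this]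
          simp
        rw [List.count_cons]
        simp [hc] at *
        omega

-- if the word is empty or ends in a space, the last segment is empty
theorem lastseg_empty : ∀ l : List Char, (l = [] ∨ l.getLast? = some ' ') →
    (pvSplit1 l).getLast? = some [] := by
  intro l
  induction l with
  | nil => intro _; simp [pvSplit1]
  | cons c rest ih =>
      intro h
      rcases h with h | h
      · exact absurd h (by simp)
      · cases rest with
        | nil =>
            simp only [List.getLast?_singleton, Option.some.injEq] at h
            subst h
            rw [pvSplit1_cons_space]
            simp [pvSplit1]
        | cons r rs =>
            rw [List.getLast?_cons_cons] at h
            have hlast := ih (Or.inr h)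
            by_cases hc : c = ' '
            · subst hc
              rw [pvSplit1_cons_space]
              cases hs : pvSplit1 (r :: rs) with
              | nil => exact absurd hs (pvSplit1_ne_nil _)
              | cons a t => rw [hs] at hlast; rw [List.getLast?_cons_cons, hlast]
            · rw [pvSplit1_cons_nonspace _ hc]
              have hspace : (' ' : Char) ∈ r :: rs := by
                exact List.mem_of_getLast? h
              have hcnt : 1 ≤ (r :: rs).count ' ' := List.one_le_count_iff.mpr hspace
              have hlen2 : 2 ≤ (pvSplit1 (r :: rs)).length := by
                rw [pvSplit1_length]; omega
              cases hs : pvSplit1 (r :: rs) with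
              | nil => exact absurd hs (pvSplit1_ne_nil _)
              | cons a t =>
                  cases t with
                  | nil => rw [hs] at hlen2; simp at hlen2
                  | cons t1 ts =>
                      rw [hs] at hlast
                      simp only [List.headI_cons, List.tail_cons]
                      rw [List.getLast?_cons_cons] at hlast ⊢
                      exact hlast

-- if the word ends in a non-space character, the last segment is non-empty
theorem lastseg_nonempty : ∀ (l : List Char) (s : List Char), l ≠ [] →
    l.getLast? ≠ some ' ' → (pvSplit1 l).getLast? = some s → s ≠ [] := by
  intro l
  induction l with
  | nil => intro s h; exact absurd rfl h
  | cons c rest ih =>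
      intro s _ hlast hs
      cases rest with
      | nil =>
          have hc : c ≠ ' ' := by
            simp only [List.getLast?_singleton] at hlast
            intro h; exact hlast (by rw [h])
          rw [pvSplit1_cons_nonspace [] hc] at hs
          simp [pvSplit1] at hs
          rw [← hs]
          simp
      | cons r rs =>
          rw [List.getLast?_cons_cons] at hlast
          by_cases hc : c = ' '
          · subst hc
            rw [pvSplit1_cons_space] at hs
            cases hsp : pvSplit1 (r :: rs) with
            | nil => exact absurd hsp (pvSplit1_ne_nil _)
            | cons a t =>
                rw [hsp, List.getLast?_cons_cons] at hs
                exact ih s (by simp) hlast (by rw [hsp]; exact hs)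
          · rw [pvSplit1_cons_nonspace _ hc] at hs
            cases hsp : pvSplit1 (r :: rs) with
            | nil => exact absurd hsp (pvSplit1_ne_nil _)
            | cons a t =>
                rw [hsp] at hs
                simp only [List.headI_cons, List.tail_cons] at hs
                cases t with
                | nil =>
                    simp only [List.getLast?_singleton, Option.some.injEq] at hs
                    rw [← hs]; simp
                | cons t1 ts =>
                    rw [List.getLast?_cons_cons] at hs
                    apply ih s (by simp) hlast
                    rw [hsp, List.getLast?_cons_cons]
                    exact hs

-- ' '.join('_' * k) = dropLast of '_ ' * k
theorem join_underscores (k : Nat) :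
    PySem.Chars.join [' '] ((List.replicate k '_').map (fun c => [c])) = (pvRepN k).dropLast := by
  induction k with
  | zero => simp [pvRepN, PySem.Chars.join_nil]
  | succ j ih =>
      cases j with
      | zero => simp [pvRepN, PySem.Chars.join_singleton]
      | succ i =>
          rw [List.replicate_succ, List.map_cons]
          have : (List.replicate (i + 1) '_').map (fun c => [c])
              = ['_'] :: (List.replicate i '_').map (fun c => [c]) := by
            rw [List.replicate_succ, List.map_cons]
          rw [this, PySem.Chars.join_cons_cons, ← this, ih]
          rw [pvRepN_succ (i + 1), pvRepN_succ i]
          simp [List.dropLast_cons₂]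

-- the joined result is non-empty whenever the last piece is
theorem join_append_ne_nil (sep y : List Char) (xs : List (List Char)) (hy : y ≠ []) :
    PySem.Chars.join sep (xs ++ [y]) ≠ [] := by
  induction xs with
  | nil => rw [List.nil_append, PySem.Chars.join_singleton]; exact hy
  | cons x xs ih =>
      rw [List.cons_append]
      cases hxs : xs ++ [y] with
      | nil => simp at hxs
      | cons a t =>
          rw [PySem.Chars.join_cons_cons]
          rw [← hxs]
          simp [ih]

-- dropping the trailing element of the last piece = dropping it from the whole join
theorem join_dropLast_last (sep y : List Char) (xs : List (List Char)) (hy : y ≠ []) :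
    PySem.Chars.join sep (xs ++ [y.dropLast]) = (PySem.Chars.join sep (xs ++ [y])).dropLast := by
  induction xs with
  | nil => rw [List.nil_append, List.nil_append, PySem.Chars.join_singleton, PySem.Chars.join_singleton]
  | cons x xs ih =>
      rw [List.cons_append, List.cons_append]
      cases hxs : xs ++ [y.dropLast] with
      | nil => simp at hxs
      | cons a t =>
          cases hxs2 : xs ++ [y] with
          | nil => simp at hxs2
          | cons b u =>
              rw [PySem.Chars.join_cons_cons, PySem.Chars.join_cons_cons, ← hxs, ← hxs2, ih]
              rw [show x ++ sep ++ PySem.Chars.join sep (xs ++ [y])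
                    = (x ++ sep) ++ PySem.Chars.join sep (xs ++ [y]) from by simp [List.append_assoc]]
              rw [List.dropLast_append_of_ne_nil (join_append_ne_nil sep y xs hy)]

-- ===== B reduces to the normal form =====
theorem alt_eq_pvE (word : String) :
    word_to_underscores_alt word = String.ofList (pvE word.toList) := by
  show String.ofList (PySem.Chars.join [' ']
      ((PySem.List.slice (PySem.Chars.splitOn word.toList [' ']) none (some (-1))).map
          (fun s => PySem.List.pyRepeat ['_', ' '] ((s.length : Int)))
        ++ [PySem.Chars.join [' ']
            ((PySem.List.pyRepeat ['_'] (((PySem.List.pyGetD (PySem.Chars.splitOn word.toList [' ']) (-1) []).length : Int))).map (fun c => [c]))]))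
    = String.ofList (pvE word.toList)
  rw [splitOn_space, PySem.List.slice_to_neg_one,
    PySem.List.pyGetD_neg_one _ _ (pvSplit1_ne_nil word.toList),
    PySem.List.pyRepeat_singleton]
  simp only [Int.toNat_natCast]
  rw [join_underscores]
  rw [show (pvSplit1 word.toList).dropLast.map (fun s => PySem.List.pyRepeat ['_', ' '] ((s.length : Int)))
        = (pvSplit1 word.toList).dropLast.map (fun s => pvRepN s.length) from
      List.map_congr_left (fun s _ => pyRepeat_rep s)]
  obtain ⟨lastseg, hlastseg⟩ : ∃ s, (pvSplit1 word.toList).getLast? = some s :=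
    ⟨_, List.getLast?_eq_some_getLast (pvSplit1_ne_nil _)⟩
  have hgl : (pvSplit1 word.toList).getLast (pvSplit1_ne_nil word.toList) = lastseg := by
    have h2 := List.getLast?_eq_some_getLast (l := pvSplit1 word.toList) (pvSplit1_ne_nil _)
    rw [hlastseg] at h2
    exact (Option.some.inj h2).symm
  rw [hgl]
  have hfull : (pvSplit1 word.toList).dropLast ++ [lastseg] = pvSplit1 word.toList := by
    rw [← hgl]
    exact List.dropLast_append_getLast _
  by_cases hcond : word.toList ≠ [] ∧ word.toList.getLast? ≠ some ' '
  · -- last segment non-empty: the trimmed last piece turns the raw join into its dropLast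
    have hlastne : lastseg ≠ [] := lastseg_nonempty word.toList lastseg hcond.1 hcond.2 hlastseg
    have hrepne : pvRepN lastseg.length ≠ [] := by
      apply pvRepN_ne_nil
      cases lastseg with
      | nil => exact absurd rfl hlastne
      | cons a t => simp
    rw [join_dropLast_last [' '] _ _ hrepne]
    rw [show [pvRepN lastseg.length] = [lastseg].map (fun s => pvRepN s.length) from rfl,
      ← List.map_append, hfull, join_map_rep]
    rw [pvE, if_pos hcond]
  · -- empty word or trailing space: the last segment is empty, nothing is trimmed
    have hor : word.toList = [] ∨ word.toList.getLast? = some ' ' := by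
      by_cases h1 : word.toList = []
      · exact Or.inl h1
      · right
        by_contra h2
        exact hcond ⟨h1, h2⟩
    have hlast0 : lastseg = [] := by
      have := lastseg_empty word.toList hor
      rw [hlastseg] at this
      exact Option.some.inj this
    rw [hlast0] at hfull
    rw [hlast0]
    rw [show List.dropLast (pvRepN ([] : List Char).length) = pvRepN ([] : List Char).length from rfl]
    rw [show [pvRepN ([] : List Char).length] = [([] : List Char)].map (fun s => pvRepN s.length) from rfl]
    rw [← List.map_append, hfull, join_map_rep]
    rw [pvE, if_neg hcond]

-- ===== A reduces to the normal form =====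

-- while every index stays below n-1, A's expansion agrees with B's
theorem pvA_prefix (xs : List Char) (n : Int) : ∀ (s : Int), s + xs.length ≤ n - 1 →
    (PySem.List.enumerate xs s).flatMap (pvA n) = xs.flatMap pvB := by
  induction xs with
  | nil => intro s h; simp [PySem.List.enumerate_nil]
  | cons x xs ih =>
      intro s h
      simp only [List.length_cons] at h
      have hs : s ≠ n - 1 := by omega
      simp only [PySem.List.enumerate_cons, List.flatMap_cons, pvA, pvB, hs, if_false]
      rw [ih (s + 1) (by omega)]

theorem a_eq_pvE (word : String) :
    word_to_underscores word = String.ofList (pvE word.toList) := by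
  unfold word_to_underscores
  have hfun : (fun (acc : List Char) (p : Int × Char) =>
      if p.2 = ' ' then acc ++ [' ']
      else if p.1 = (word.toList.length : Int) - 1 then acc ++ ['_']
      else acc ++ ['_', ' ']) =
      fun acc p => acc ++ pvA (word.toList.length : Int) p := by
    funext acc p; simp only [pvA]; split_ifs <;> rfl
  rw [hfun, PySem.List.foldl_append_eq_flatMap]
  unfold pvE
  induction word.toList using List.reverseRecOn with
  | nil => simp [PySem.List.enumerate_nil]
  | append_singleton xs c _ =>
      rw [PySem.List.enumerate_append, List.flatMap_append]
      rw [pvA_prefix xs ((xs ++ [c]).length : Int) 0 (by simp)]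
      simp only [PySem.List.enumerate_nil, PySem.List.enumerate_cons, List.flatMap_cons,
        List.flatMap_nil, List.append_nil, List.nil_append]
      by_cases hc : c = ' '
      · subst hc
        rw [if_neg (by simp)]
        simp [pvA, pvB, List.flatMap_append]
      · have hidx : ((0 : Int) + xs.length) = ((xs ++ [c]).length : Int) - 1 := by simp
        simp only [pvA]
        rw [if_neg hc, if_pos hidx,
          if_pos ⟨by simp, by rw [List.getLast?_concat]; simp [hc]⟩]
        congr 1
        rw [List.flatMap_append, List.flatMap_cons, List.flatMap_nil, List.append_nil]
        rw [show pvB c = ['_', ' '] from by simp [pvB, hc]]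
        rw [show List.flatMap pvB xs ++ ['_', ' '] =
            (List.flatMap pvB xs ++ ['_']) ++ [' '] by simp,
          List.dropLast_concat]

-- ===== VERDICT (by name: the statement is the Claim_ definition above) =====
theorem word_to_underscores_spec : Claim_equal_word_to_underscores := by
  intro word _
  unfold Spec_word_to_underscores
  rw [a_eq_pvE, alt_eq_pvE]
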